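-- pv_equiv track=rewrite | github.com/Walkiiiy/Zensplit | pure_projection/src/vertical.py | get_vvList
-- ===== SOURCE A (Python) =====
-- def get_vvList(list_data):
--     #取出list中像素存在的区间
--     vv_list=list()
--     v_list=list()
--
--     total_row = len(list_data)
--     row_num = 0
--
--     while row_num<total_row:
--         flag = 0  # defult设置为连续两列空相素才允许分割，解决二值化部分像素缺失问题
--
--         while row_num<total_row:
--             if list_data[row_num]>0 :
--                 v_list.append(row_num)
--                 if flag>0:
--                     flag=0
--             else:
--                 flag+=1
--                 if v_list and flag==2:
--                     vv_list.append(v_list)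
--                     #list的clear与[]有区别
--                     v_list=[]
--                     flag=0
--                     row_num+=1
--                     break
--             row_num+=1
--
--     return vv_list
-- ===== SOURCE B (Python) =====
-- def get_vvList(list_data):
--     # Single pass: collect positive indices, then group them by gap >= 3,
--     # keeping the final group only if >= 2 empty columns follow it (uniform right-boundary rule).
--     pos = [i for i, v in enumerate(list_data) if v > 0]
--     if not pos:
--         return []
--     groups = []
--     cur = [pos[0]]
--     last = pos[0]
--     for p in pos[1:]:
--         if p - last >= 3:
--             groups.append(cur)
--             cur = [p]
--         else:
--             cur.append(p)
--         last = p
--     if len(list_data) - last >= 3: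
--         groups.append(cur)
--     return groups
-- ===== Notes on version B (the rewrite author's own statement) =====
-- stated objective: simpler
-- what changed: Replaces A's nested while loops with a per-segment empty-column flag counter by one pass that collects the positive indices and then groups them wherever the gap between consecutive positives is >= 3, appending the final group only when >= 3 columns separate its last positive from the end (the uniform right-boundary rule A's flag mechanism implements).
import Mathlib
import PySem

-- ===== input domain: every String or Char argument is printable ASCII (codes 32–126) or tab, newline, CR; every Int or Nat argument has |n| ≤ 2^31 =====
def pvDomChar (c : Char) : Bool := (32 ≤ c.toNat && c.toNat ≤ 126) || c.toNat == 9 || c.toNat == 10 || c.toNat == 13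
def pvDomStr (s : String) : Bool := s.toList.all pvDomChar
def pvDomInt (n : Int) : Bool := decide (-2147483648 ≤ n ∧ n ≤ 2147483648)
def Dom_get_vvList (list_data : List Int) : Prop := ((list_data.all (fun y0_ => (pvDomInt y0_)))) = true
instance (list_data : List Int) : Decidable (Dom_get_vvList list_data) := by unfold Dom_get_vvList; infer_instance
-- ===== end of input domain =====

-- B replaces A's nested while loops and empty-column flag state machine by one pass
-- collecting positive indices followed by grouping them on gaps ≥ 3 (objective: simpler).

-- ===== PORT A =====
-- inner `while row_num<total_row` loop of A: returns (row_num, v_list, vv_list) at break or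
-- loop end; fuel (≥ total_row - row_num at every call) only makes the recursion structural
def pvInnerA (xs : List Int) (fuel : Nat) (i : Nat) (flag : Int) (v : List Int)
    (vv : List (List Int)) : Nat × List Int × List (List Int) :=
  match fuel with
  | 0 => (i, v, vv)
  | fuel + 1 =>
    if h : i < xs.length then
      if xs[i] > 0 then
        pvInnerA xs fuel (i + 1) (if flag > 0 then 0 else flag) (v ++ [(i : Int)]) vv
      else
        if v ≠ [] ∧ flag + 1 = 2 then (i + 1, [], vv ++ [v])
        else pvInnerA xs fuel (i + 1) (flag + 1) v vv
    else (i, v, vv)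

-- outer `while row_num<total_row` loop of A (flag is reset to 0 each iteration); fuel again
-- only bounds the recursion (each inner run advances row_num, so length + 1 always suffices)
def pvOuterA (xs : List Int) (fuel : Nat) (i : Nat) (v : List Int) (vv : List (List Int)) :
    List (List Int) :=
  match fuel with
  | 0 => vv
  | fuel + 1 =>
    if i < xs.length then
      let r := pvInnerA xs xs.length i 0 v vv
      pvOuterA xs fuel r.1 r.2.1 r.2.2
    else vv

def get_vvList (list_data : List Int) : List (List Int) :=
  pvOuterA list_data (list_data.length + 1) 0 [] []

-- ===== PORT B =====
-- pos = [i for i, v in enumerate(list_data) if v > 0]  (i is the running enumerate index;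
-- fuel ≥ length - i only makes the recursion structural)
def pvPos (xs : List Int) (fuel : Nat) (i : Nat) : List Int :=
  match fuel with
  | 0 => []
  | fuel + 1 =>
    if h : i < xs.length then
      if xs[i] > 0 then (i : Int) :: pvPos xs fuel (i + 1) else pvPos xs fuel (i + 1)
    else []

-- the `for p in pos[1:]` loop plus the final right-boundary append
def pvBLoop (n : Int) (ps : List Int) (cur : List Int) (last : Int)
    (groups : List (List Int)) : List (List Int) :=
  match ps with
  | [] => if n - last ≥ 3 then groups ++ [cur] else groups
  | p :: rest =>
    if p - last ≥ 3 then pvBLoop n rest [p] p (groups ++ [cur])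
    else pvBLoop n rest (cur ++ [p]) p groups

def get_vvList_alt (list_data : List Int) : List (List Int) :=
  match pvPos list_data list_data.length 0 with
  | [] => []
  | p :: rest => pvBLoop (list_data.length : Int) rest [p] p []

-- ===== PRECONDITION & SPEC =====
def Spec_get_vvList (list_data : List Int) (out : List (List Int)) : Prop := out = get_vvList_alt list_data
instance (list_data : List Int) (out : List (List Int)) : Decidable (Spec_get_vvList list_data out) := by unfold Spec_get_vvList; infer_instance

-- ===== CLAIM (what is proved, stated in full; the proofs are below) =====
def Claim_equal_get_vvList : Prop := ∀ (list_data : List Int), Dom_get_vvList list_data → Spec_get_vvList list_data (get_vvList list_data)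

-- ===== LEMMAS AND PROOFS =====

-- A's combined loop without the vv accumulator (proof-side model of A)
def pvGA (xs : List Int) (i : Nat) (flag : Int) (v : List Int) : List (List Int) :=
  if h : i < xs.length then
    if xs[i] > 0 then pvGA xs (i + 1) 0 (v ++ [(i : Int)])
    else
      if v ≠ [] ∧ flag + 1 = 2 then v :: pvGA xs (i + 1) 0 []
      else pvGA xs (i + 1) (flag + 1) v
  else []
termination_by xs.length - i

-- fuel-free version of pvPos (proof-side)
def pvPosW (xs : List Int) (i : Nat) : List Int :=
  if h : i < xs.length then
    if xs[i] > 0 then (i : Int) :: pvPosW xs (i + 1) else pvPosW xs (i + 1)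
  else []
termination_by xs.length - i

theorem pvPos_fuel (xs : List Int) : ∀ (fuel i : Nat), xs.length - i ≤ fuel →
    pvPos xs fuel i = pvPosW xs i := by
  intro fuel
  induction fuel with
  | zero =>
    intro i h
    rw [pvPos, pvPosW]
    rw [dif_neg (by omega)]
  | succ fuel IH =>
    intro i h
    rw [pvPosW]
    simp only [pvPos]
    by_cases hi : i < xs.length
    · simp only [hi, dite_true]
      split <;> rw [IH (i + 1) (by omega)]
    · simp only [hi, dite_false]

theorem pvInnerA_stop (xs : List Int) (fuel j : Nat) (f : Int) (v : List Int)
    (vv : List (List Int)) (h : ¬ j < xs.length) :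
    pvInnerA xs fuel j f v vv = (j, v, vv) := by
  cases fuel <;> simp [pvInnerA, h]

theorem pvOuterA_stop (xs : List Int) (fuel j : Nat) (v : List Int)
    (vv : List (List Int)) (h : ¬ j < xs.length) :
    pvOuterA xs fuel j v vv = vv := by
  cases fuel <;> simp [pvOuterA, h]

-- running the inner loop then continuing the outer loop = accumulator ++ pvGA
theorem pvOuter_inner (xs : List Int) : ∀ (k i : Nat) (flag : Int) (v : List Int)
    (vv : List (List Int)) (fuelI fuelO : Nat), 0 ≤ flag → xs.length - i ≤ k →
    xs.length - i ≤ fuelI → xs.length - i ≤ fuelO →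
    pvOuterA xs fuelO (pvInnerA xs fuelI i flag v vv).1 (pvInnerA xs fuelI i flag v vv).2.1
      (pvInnerA xs fuelI i flag v vv).2.2 = vv ++ pvGA xs i flag v := by
  intro k
  induction k with
  | zero =>
    intro i flag v vv fuelI fuelO hf hk hfI hfO
    rw [pvInnerA_stop xs fuelI i flag v vv (by omega),
        pvOuterA_stop xs fuelO i v vv (by omega), pvGA]
    rw [dif_neg (by omega)]
    simp
  | succ k IH =>
    intro i flag v vv fuelI fuelO hf hk hfI hfO
    by_cases h : i < xs.length
    · obtain ⟨fI, rfl⟩ : ∃ fI, fuelI = fI + 1 := ⟨fuelI - 1, by omega⟩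
      simp only [pvInnerA, h, dite_true]
      rw [pvGA]
      simp only [h, dite_true]
      by_cases hx : xs[i] > 0
      · simp only [hx, if_true]
        have hf' : (if flag > 0 then 0 else flag) = 0 := by split <;> omega
        rw [hf']
        exact IH (i + 1) 0 (v ++ [(i : Int)]) vv fI fuelO (le_refl 0) (by omega) (by omega)
          (by omega)
      · simp only [hx, if_false]
        by_cases hb : v ≠ [] ∧ flag + 1 = 2
        · simp only [if_pos hb]
          obtain ⟨fO, rfl⟩ : ∃ fO, fuelO = fO + 1 := ⟨fuelO - 1, by omega⟩
          simp only [pvOuterA]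
          by_cases h2 : i + 1 < xs.length
          · rw [if_pos h2,
              IH (i + 1) 0 [] (vv ++ [v]) xs.length fO (le_refl 0) (by omega) (by omega)
                (by omega)]
            simp
          · rw [if_neg h2, pvGA]
            simp [h2]
        · simp only [if_neg hb]
          exact IH (i + 1) (flag + 1) v vv fI fuelO (by omega) (by omega) (by omega) (by omega)
    · rw [pvInnerA_stop xs (fuelI) i flag v vv h, pvOuterA_stop xs fuelO i v vv h, pvGA]
      rw [dif_neg h]
      simp

theorem get_vvList_eq_gA (xs : List Int) : get_vvList xs = pvGA xs 0 0 [] := by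
  rw [get_vvList]
  by_cases h : 0 < xs.length
  · simp only [pvOuterA]
    rw [if_pos h]
    exact pvOuter_inner xs xs.length 0 0 [] [] xs.length xs.length le_rfl (by omega) (by omega)
      (by omega)
  · rw [pvOuterA_stop xs _ _ _ _ h, pvGA]
    rw [dif_neg h]

-- accumulator law for B's loop
theorem pvBLoop_acc (n : Int) (ps : List Int) (cur : List Int) (last : Int)
    (groups : List (List Int)) :
    pvBLoop n ps cur last groups = groups ++ pvBLoop n ps cur last [] := by
  induction ps generalizing cur last groups with
  | nil => rw [pvBLoop, pvBLoop]; split <;> simp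
  | cons p rest IH =>
    rw [pvBLoop, pvBLoop]
    split
    · rw [IH [p] p (groups ++ [cur]), IH [p] p ([] ++ [cur])]
      simp
    · exact IH _ _ _

-- head of pvPosW xs j is ≥ j
theorem pvPosW_head_ge (xs : List Int) (j : Nat) (p : Int) (rest : List Int)
    (h : pvPosW xs j = p :: rest) : (j : Int) ≤ p := by
  induction hk : xs.length - j using Nat.strong_induction_on generalizing j with
  | _ k IH =>
    rw [pvPosW] at h
    by_cases hj : j < xs.length
    · simp only [hj, dite_true] at h
      by_cases hx : xs[j] > 0
      · simp only [hx, if_true] at h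
        cases h; simp
      · simp only [hx, if_false] at h
        have := IH (xs.length - (j+1)) (by omega) (j+1) h rfl
        push_cast at this ⊢; omega
    · simp [hj] at h

def pvBAll (n : Int) (ps : List Int) : List (List Int) :=
  match ps with
  | [] => []
  | p :: rest => pvBLoop n rest [p] p []

theorem pvKeyEnd (xs : List Int) (i : Nat) (h : ¬ i < xs.length) :
    (∀ flag : Int, 0 ≤ flag → pvGA xs i flag [] = pvBAll (xs.length : Int) (pvPosW xs i))
    ∧ (∀ v : List Int, v ≠ [] →
        pvGA xs i 0 v = pvBLoop (xs.length : Int) (pvPosW xs i) v ((i : Int) - 1) [])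
    ∧ (∀ v : List Int, v ≠ [] →
        pvGA xs i 1 v = pvBLoop (xs.length : Int) (pvPosW xs i) v ((i : Int) - 2) []) := by
  have hn : (xs.length : Int) ≤ (i : Int) := by exact_mod_cast Nat.le_of_not_lt h
  refine ⟨fun f _ => ?_, fun v _ => ?_, fun v _ => ?_⟩ <;>
    rw [pvGA, pvPosW] <;> simp only [h, dite_false]
  · simp [pvBAll]
  · simp only [pvBLoop]; rw [if_neg (by omega)]
  · simp only [pvBLoop]; rw [if_neg (by omega)]

theorem pvKey (xs : List Int) : ∀ (k i : Nat), xs.length - i ≤ k →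
    (∀ flag : Int, 0 ≤ flag → pvGA xs i flag [] = pvBAll (xs.length : Int) (pvPosW xs i))
    ∧ (∀ v : List Int, v ≠ [] →
        pvGA xs i 0 v = pvBLoop (xs.length : Int) (pvPosW xs i) v ((i : Int) - 1) [])
    ∧ (∀ v : List Int, v ≠ [] →
        pvGA xs i 1 v = pvBLoop (xs.length : Int) (pvPosW xs i) v ((i : Int) - 2) []) := by
  intro k
  induction k with
  | zero => intro i hk; exact pvKeyEnd xs i (by omega)
  | succ k IH =>
    intro i hk
    by_cases h : i < xs.length
    · obtain ⟨J1, J2, J3⟩ := IH (i + 1) (by omega)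
      have hsub1 : ((i + 1 : Nat) : Int) - 1 = (i : Int) := by push_cast; ring
      have hsub2 : ((i + 1 : Nat) : Int) - 2 = (i : Int) - 1 := by push_cast; ring
      by_cases hx : xs[i] > 0
      · have hp : pvPosW xs i = (i : Int) :: pvPosW xs (i + 1) := by
          rw [pvPosW]; simp [h, hx]
        refine ⟨fun f hf => ?_, fun v hv => ?_, fun v hv => ?_⟩
        · rw [pvGA]
          simp only [h, dite_true, hx, if_true, List.nil_append]
          rw [hp, pvBAll, J2 [(i : Int)] (by simp), hsub1]
        · rw [pvGA]
          simp only [h, dite_true, hx, if_true]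
          rw [hp, pvBLoop, if_neg (by omega), J2 (v ++ [(i : Int)]) (by simp), hsub1]
        · rw [pvGA]
          simp only [h, dite_true, hx, if_true]
          rw [hp, pvBLoop, if_neg (by omega), J2 (v ++ [(i : Int)]) (by simp), hsub1]
      · have hp : pvPosW xs i = pvPosW xs (i + 1) := by
          rw [pvPosW]; simp [h, hx]
        refine ⟨fun f hf => ?_, fun v hv => ?_, fun v hv => ?_⟩
        · rw [pvGA]
          simp only [h, dite_true, hx, if_false]
          rw [if_neg (by simp), hp]
          exact J1 (f + 1) (by omega)
        · rw [pvGA]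
          simp only [h, dite_true, hx, if_false]
          rw [if_neg (by simp), hp]
          have h01 : (0 : Int) + 1 = 1 := by norm_num
          rw [h01, J3 v hv, hsub2]
        · rw [pvGA]
          simp only [h, dite_true, hx, if_false]
          rw [if_pos ⟨hv, rfl⟩, hp, J1 0 le_rfl]
          have hin : (i : Int) < (xs.length : Int) := by exact_mod_cast h
          cases hq : pvPosW xs (i + 1) with
          | nil =>
            simp only [pvBAll, pvBLoop]
            rw [if_pos (by omega)]
            simp
          | cons p rest =>
            have hge : ((i + 1 : Nat) : Int) ≤ p := pvPosW_head_ge xs (i + 1) p rest hq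
            push_cast at hge
            conv_rhs => rw [pvBLoop]
            rw [if_pos (by omega), pvBLoop_acc]
            simp [pvBAll]
    · exact pvKeyEnd xs i h

theorem get_vvList_alt_eq_bAll (xs : List Int) :
    get_vvList_alt xs = pvBAll (xs.length : Int) (pvPosW xs 0) := by
  have hp := pvPos_fuel xs xs.length 0 (by omega)
  cases hq : pvPosW xs 0 <;> simp [get_vvList_alt, pvBAll, hp, hq]

-- ===== VERDICT (by name: the statement is the Claim_ definition above) =====
theorem get_vvList_spec : Claim_equal_get_vvList := by
  intro xs _
  unfold Spec_get_vvList
  rw [get_vvList_eq_gA, get_vvList_alt_eq_bAll]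
  exact (pvKey xs xs.length 0 (by omega)).1 0 le_rfl
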